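-- pv_equiv track=rewrite | github.com/mossaab3/adventofcode_repo | advent_of_code_1_solution.py | match_lists
-- ===== SOURCE A (Python) =====
-- def match_lists(input_1, input_2) -> list:
--
--     ## asserting input_1 and input_2 are of the same size to be matched and their size is bigger than 0
--     assert(len(input_1) > 0) and len(input_2), "Input lists must be of size greater than 0."
--     assert len(input_1) == len(input_2), "Input lists must be of the same length."
--
--     ## here we create a list of tuples with the values of the two lists
--     size = len(input_1)
--
--     matched_list_of_tuples = []
--     for i in range(size):
--         minimum_input_1 = min(input_1)
--         minimum_input_2 = min(input_2)
--         index_input_1 = input_1.index(minimum_input_1)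
--         index_input_2 = input_2.index(minimum_input_2)
--         matched_list_of_tuples.append((minimum_input_1, minimum_input_2))
--         input_1.pop(index_input_1)
--         input_2.pop(index_input_2)
--
--     return matched_list_of_tuples
-- ===== SOURCE B (Python) =====
-- def match_lists(input_1, input_2) -> list:
--     assert len(input_1) > 0, "Input lists must be of size greater than 0."
--     assert len(input_1) == len(input_2), "Input lists must be of the same length."
--     return list(zip(sorted(input_1), sorted(input_2)))
-- ===== Notes on version B (the rewrite author's own statement) =====
-- stated objective: faster
-- what changed: Replaces the repeated min/index/pop selection loop (quadratic, destroying its arguments) with sorting both lists once and zipping them; B does not mutate its arguments (equivalence is about the return value).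
import Mathlib
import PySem

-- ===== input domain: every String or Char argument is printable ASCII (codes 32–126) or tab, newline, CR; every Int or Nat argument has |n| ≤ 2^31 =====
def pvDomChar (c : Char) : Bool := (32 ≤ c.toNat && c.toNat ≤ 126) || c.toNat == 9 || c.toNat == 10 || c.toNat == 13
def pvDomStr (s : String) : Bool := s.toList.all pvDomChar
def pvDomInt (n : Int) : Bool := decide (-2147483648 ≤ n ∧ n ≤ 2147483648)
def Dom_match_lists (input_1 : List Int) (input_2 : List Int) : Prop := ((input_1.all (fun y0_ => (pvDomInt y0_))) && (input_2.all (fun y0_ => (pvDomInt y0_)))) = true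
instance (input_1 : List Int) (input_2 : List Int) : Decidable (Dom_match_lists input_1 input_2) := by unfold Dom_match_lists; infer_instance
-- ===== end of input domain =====

-- B replaces A's quadratic min/index/pop selection loop by sorting both lists once and zipping them
-- (asymptotically faster); A empties both argument lists in place, B does not mutate them — the
-- equivalence proved here is about the return value only.


-- ===== PORT A =====
-- the 'for i in range(size)' loop: each iteration takes min of each list, its first index,
-- appends the pair, and pops the minima; option-returning primitives fall back to stopping
-- (Python raises there; Pre_ excludes those inputs)
def matchLoopA : Nat → List Int → List Int → List (Int × Int) → List (Int × Int)
  | 0, _, _, acc => acc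
  | n + 1, l1, l2, acc =>
    match PySem.List.min? l1 (fun x => x), PySem.List.min? l2 (fun x => x) with
    | some m1, some m2 =>
      match PySem.List.index? l1 m1, PySem.List.index? l2 m2 with
      | some i1, some i2 =>
        match PySem.List.pop? l1 (i1 : Int), PySem.List.pop? l2 (i2 : Int) with
        | some (_, r1), some (_, r2) => matchLoopA n r1 r2 (acc ++ [(m1, m2)])
        | _, _ => acc ++ [(m1, m2)]
      | _, _ => acc
    | _, _ => acc

def match_lists (input_1 : List Int) (input_2 : List Int) : List (Int × Int) :=
  matchLoopA input_1.length input_1 input_2 []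

-- ===== PORT B =====
def match_lists_alt (input_1 : List Int) (input_2 : List Int) : List (Int × Int) :=
  List.zip (PySem.List.sorted input_1 (fun x => x) false) (PySem.List.sorted input_2 (fun x => x) false)

-- ===== PRECONDITION & SPEC =====
-- A raises AssertionError on an empty input_1 or on lists of different lengths; excluded here.
def Pre_match_lists (input_1 : List Int) (input_2 : List Int) : Prop :=
  input_1 ≠ [] ∧ input_1.length = input_2.length
instance (input_1 : List Int) (input_2 : List Int) : Decidable (Pre_match_lists input_1 input_2) := by unfold Pre_match_lists; infer_instance

def pvWitness_match_lists : List Int × List Int := ([3, 1, 2], [5, 4, 6])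

def Spec_match_lists (input_1 : List Int) (input_2 : List Int) (out : List (Int × Int)) : Prop := out = match_lists_alt input_1 input_2
instance (input_1 : List Int) (input_2 : List Int) (out : List (Int × Int)) : Decidable (Spec_match_lists input_1 input_2 out) := by unfold Spec_match_lists; infer_instance

-- ===== CLAIM (what is proved, stated in full; the proofs are below) =====
def Claim_equal_match_lists : Prop := ∀ (input_1 : List Int) (input_2 : List Int), Dom_match_lists input_1 input_2 → Pre_match_lists input_1 input_2 → Spec_match_lists input_1 input_2 (match_lists input_1 input_2)

-- ===== LEMMAS AND PROOFS =====

-- popping at the first index of the minimum is erasing the minimum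
theorem eraseIdx_of_index? (l : List Int) (m : Int) (i : Nat)
    (h : PySem.List.index? l m = some i) : l.eraseIdx i = l.erase m := by
  rw [PySem.List.index?_eq_idxOf?] at h
  rw [List.erase_eq_eraseIdx, h]

-- sorted(l) = min :: sorted(l with its first min removed)
theorem sorted_eq_min_cons (l : List Int) (m : Int)
    (h : PySem.List.min? l (fun x => x) = some m) :
    PySem.List.sorted l (fun x => x) false =
      m :: PySem.List.sorted (l.erase m) (fun x => x) false := by
  have hmem : m ∈ l := PySem.List.min?_mem h
  have hmin : ∀ y ∈ l, m ≤ y := fun y hy => PySem.List.min?_isMin h y hy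
  apply PySem.List.sorted_id_eq_of_perm_of_pairwise
  · exact ((PySem.List.sorted_perm (l.erase m) (fun x => x) false).cons m).trans
      (List.perm_cons_erase hmem).symm
  · refine List.pairwise_cons.mpr ⟨?_, ?_⟩
    · intro y hy
      exact hmin y (l.erase_subset ((PySem.List.mem_sorted _ _ _ _).mp hy))
    · exact PySem.List.sorted_pairwise (l.erase m) (fun x => x)

-- the selection loop, run n = |l1| = |l2| steps, produces acc ++ zip(sorted l1, sorted l2)
theorem matchLoopA_eq (n : Nat) : ∀ (l1 l2 : List Int) (acc : List (Int × Int)),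
    l1.length = n → l2.length = n →
    matchLoopA n l1 l2 acc =
      acc ++ List.zip (PySem.List.sorted l1 (fun x => x) false)
                      (PySem.List.sorted l2 (fun x => x) false) := by
  induction n with
  | zero =>
    intro l1 l2 acc h1 h2
    rw [List.length_eq_zero_iff.mp h1, List.length_eq_zero_iff.mp h2]
    simp [matchLoopA, PySem.List.sorted]
  | succ n ih =>
    intro l1 l2 acc h1 h2
    have hne1 : l1 ≠ [] := by intro h; simp [h] at h1
    have hne2 : l2 ≠ [] := by intro h; simp [h] at h2
    obtain ⟨m1, hm1⟩ : ∃ m, PySem.List.min? l1 (fun x => x) = some m := by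
      cases hc : PySem.List.min? l1 (fun x => x) with
      | none => exact absurd ((PySem.List.min?_eq_none_iff _ _).mp hc) hne1
      | some m => exact ⟨m, rfl⟩
    obtain ⟨m2, hm2⟩ : ∃ m, PySem.List.min? l2 (fun x => x) = some m := by
      cases hc : PySem.List.min? l2 (fun x => x) with
      | none => exact absurd ((PySem.List.min?_eq_none_iff _ _).mp hc) hne2
      | some m => exact ⟨m, rfl⟩
    obtain ⟨i1, hi1⟩ := Option.isSome_iff_exists.mp
      ((PySem.List.index?_isSome_iff l1 m1).mpr (PySem.List.min?_mem hm1))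
    obtain ⟨i2, hi2⟩ := Option.isSome_iff_exists.mp
      ((PySem.List.index?_isSome_iff l2 m2).mpr (PySem.List.min?_mem hm2))
    have hlt1 : i1 < l1.length := (PySem.List.getElem_of_index?_eq_some hi1).1
    have hlt2 : i2 < l2.length := (PySem.List.getElem_of_index?_eq_some hi2).1
    have hp1 := PySem.List.pop?_natCast l1 (n := i1) (by simpa using hlt1)
    have hp2 := PySem.List.pop?_natCast l2 (n := i2) (by simpa using hlt2)
    rw [matchLoopA]
    simp only [hm1, hm2, hi1, hi2, hp1, hp2]
    rw [eraseIdx_of_index? l1 m1 i1 hi1, eraseIdx_of_index? l2 m2 i2 hi2]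
    rw [ih (l1.erase m1) (l2.erase m2) _
        (by rw [List.length_erase_of_mem (PySem.List.min?_mem hm1)]; omega)
        (by rw [List.length_erase_of_mem (PySem.List.min?_mem hm2)]; omega)]
    rw [sorted_eq_min_cons l1 m1 hm1, sorted_eq_min_cons l2 m2 hm2]
    simp [List.zip_cons_cons]

-- ===== VERDICT (by name: the statement is the Claim_ definition above) =====
theorem match_lists_spec : Claim_equal_match_lists := by
  intro l1 l2 _ hpre
  unfold Spec_match_lists match_lists match_lists_alt
  exact matchLoopA_eq l1.length l1 l2 [] rfl hpre.2.symm |>.trans (by simp)
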